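-- pv_equiv track=rewrite | github.com/tomking2077/tool-augmented-chatbot-plus | document_handling.py | _check_files_changed
-- ===== SOURCE A (Python) =====
-- def _check_files_changed(file_hashes: dict, file_metadata: dict) -> bool:
--     """Check if any files have changed by comparing hashes
--
--     Only checks the files in file_hashes - doesn't require exact set match.
--     This allows loading a subset of files even if metadata has more files.
--     """
--     if not file_metadata:
--         return True
--
--     # Filter out index hash keys (format: "{file_name}_index_hash") from metadata
--     stored_file_set = {k for k in file_metadata.keys() if not k.endswith("_index_hash")}
--     current_file_set = set(file_hashes.keys())
--
--     # Check if all current files exist in stored metadata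
--     if not current_file_set.issubset(stored_file_set):
--         # Some files are new - they've changed
--         return True
--
--     # Check if any file hashes changed (only for files being uploaded)
--     return any(
--         file_metadata.get(file_name) != file_hash
--         for file_name, file_hash in file_hashes.items()
--     )
-- ===== SOURCE B (Python) =====
-- def _check_files_changed(file_hashes: dict, file_metadata: dict) -> bool:
--     """Single pass: a file counts as changed if its key is an index-hash key,
--     or its stored hash is missing or different."""
--     if not file_metadata:
--         return True
--     for file_name, file_hash in file_hashes.items():
--         if file_name.endswith("_index_hash") or file_metadata.get(file_name) != file_hash:
--             return True
--     return False
-- ===== Notes on version B (the rewrite author's own statement) =====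
-- stated objective: simpler
-- what changed: Replaces the two-pass shape (build a filtered stored-key set, subset test, then a separate any() over hashes) with one early-return loop over file_hashes.items() whose per-entry test (suffix key, missing key, or differing hash) subsumes the subset check, dropping both set constructions.
import Mathlib
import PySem

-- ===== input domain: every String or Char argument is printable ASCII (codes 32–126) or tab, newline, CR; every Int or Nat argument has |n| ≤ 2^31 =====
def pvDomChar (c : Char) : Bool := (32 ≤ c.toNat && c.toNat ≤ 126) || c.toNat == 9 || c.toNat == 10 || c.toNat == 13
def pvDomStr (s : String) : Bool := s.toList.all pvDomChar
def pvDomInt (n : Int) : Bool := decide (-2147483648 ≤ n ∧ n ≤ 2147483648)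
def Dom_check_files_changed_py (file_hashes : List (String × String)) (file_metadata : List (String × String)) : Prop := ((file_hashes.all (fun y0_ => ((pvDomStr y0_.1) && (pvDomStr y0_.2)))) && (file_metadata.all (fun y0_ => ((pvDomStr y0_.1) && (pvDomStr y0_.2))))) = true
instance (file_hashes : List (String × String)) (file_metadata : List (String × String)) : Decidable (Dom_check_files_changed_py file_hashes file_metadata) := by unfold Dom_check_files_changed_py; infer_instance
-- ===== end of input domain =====

-- B replaces A's two passes (filtered stored-key set + subset test, then any()) with one
-- early-return loop over file_hashes whose per-entry test subsumes the subset check (objective: simpler).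
-- ===== PORT A =====
def check_files_changed_py (file_hashes : List (String × String)) (file_metadata : List (String × String)) : Bool :=
  let dFM : PySem.Dict String String := PySem.Dict.ofList file_metadata
  let dFH : PySem.Dict String String := PySem.Dict.ofList file_hashes
  if dFM.items.isEmpty then true
  else
    let stored : PySem.Set String :=
      PySem.Set.ofList (dFM.keys.filter (fun k => !(PySem.Str.endswith k "_index_hash")))
    let current : PySem.Set String := PySem.Set.ofList dFH.keys
    if !(PySem.Set.issubset current stored) then true
    else dFH.items.any (fun p => decide (dFM.get? p.1 ≠ some p.2))

-- ===== PORT B =====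
def altChangedLoop (dFM : PySem.Dict String String) : List (String × String) → Bool
  | [] => false
  | (n, h) :: rest =>
    if PySem.Str.endswith n "_index_hash" || decide (dFM.get? n ≠ some h) then true
    else altChangedLoop dFM rest

def check_files_changed_py_alt (file_hashes : List (String × String)) (file_metadata : List (String × String)) : Bool :=
  let dFM : PySem.Dict String String := PySem.Dict.ofList file_metadata
  if dFM.items.isEmpty then true
  else altChangedLoop dFM (PySem.Dict.ofList file_hashes).items

-- ===== PRECONDITION & SPEC =====
def Spec_check_files_changed_py (file_hashes : List (String × String)) (file_metadata : List (String × String)) (out : Bool) : Prop := out = check_files_changed_py_alt file_hashes file_metadata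
instance (file_hashes : List (String × String)) (file_metadata : List (String × String)) (out : Bool) : Decidable (Spec_check_files_changed_py file_hashes file_metadata out) := by unfold Spec_check_files_changed_py; infer_instance

-- ===== CLAIM (what is proved, stated in full; the proofs are below) =====
def Claim_equal_check_files_changed_py : Prop := ∀ (file_hashes : List (String × String)) (file_metadata : List (String × String)), Dom_check_files_changed_py file_hashes file_metadata → Spec_check_files_changed_py file_hashes file_metadata (check_files_changed_py file_hashes file_metadata)

-- ===== LEMMAS AND PROOFS =====

-- B's loop is any() of its per-entry test
theorem altChangedLoop_eq_any (dFM : PySem.Dict String String) (l : List (String × String)) :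
    altChangedLoop dFM l
      = l.any (fun p => PySem.Str.endswith p.1 "_index_hash" || decide (dFM.get? p.1 ≠ some p.2)) := by
  induction l with
  | nil => rfl
  | cons p rest ih =>
    obtain ⟨n, h⟩ := p
    simp only [altChangedLoop, List.any_cons, ← ih]
    cases hc : (PySem.Str.endswith n "_index_hash" || decide (dFM.get? n ≠ some h)) <;>
      simp only [if_true, Bool.false_eq_true, if_false, Bool.true_or, Bool.false_or]

theorem check_files_changed_eq (file_hashes : List (String × String)) (file_metadata : List (String × String)) :
    check_files_changed_py file_hashes file_metadata = check_files_changed_py_alt file_hashes file_metadata := by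
  unfold check_files_changed_py check_files_changed_py_alt
  set dFM : PySem.Dict String String := PySem.Dict.ofList file_metadata with hFM
  set dFH : PySem.Dict String String := PySem.Dict.ofList file_hashes with hFH
  by_cases hemp : dFM.items.isEmpty
  · simp only [hemp, if_true]
  · simp only [hemp, Bool.false_eq_true, if_false, altChangedLoop_eq_any]
    cases hsub : PySem.Set.issubset (PySem.Set.ofList dFH.keys)
        (PySem.Set.ofList (dFM.keys.filter (fun k => !(PySem.Str.endswith k "_index_hash")))) with
    | true =>
      simp only [Bool.not_true, Bool.false_eq_true, if_false]
      rw [Bool.eq_iff_iff]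
      simp only [List.any_eq_true, Bool.or_eq_true, decide_eq_true_eq]
      constructor
      · rintro ⟨p, hp, hne⟩
        exact ⟨p, hp, Or.inr hne⟩
      · rintro ⟨⟨n, h⟩, hmem, (hend | hne)⟩
        · -- an _index_hash key among the uploaded files would contradict the subset test
          exfalso
          have hn : n ∈ PySem.Set.ofList dFH.keys := by
            rw [PySem.Set.mem_ofList]
            simp only [PySem.Dict.keys, List.mem_map]
            exact ⟨(n, h), hmem, rfl⟩
          have hst := (PySem.Set.issubset_iff _ _).mp hsub n hn
          rw [PySem.Set.mem_ofList, List.mem_filter] at hst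
          simp only [hend, Bool.not_true] at hst
          exact absurd hst.2 (by simp)
        · exact ⟨(n, h), hmem, hne⟩
    | false =>
      simp only [Bool.not_false]
      rw [if_pos trivial]
      -- the subset test failed: some uploaded key is missing from the filtered stored set
      have hex : ¬ (∀ x ∈ PySem.Set.ofList dFH.keys,
          x ∈ PySem.Set.ofList (dFM.keys.filter (fun k => !(PySem.Str.endswith k "_index_hash")))) := by
        rw [← PySem.Set.issubset_iff, hsub]
        simp
      push Not at hex
      obtain ⟨n, hn, hnst⟩ := hex
      rw [PySem.Set.mem_ofList] at hn
      simp only [PySem.Dict.keys, List.mem_map] at hn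
      obtain ⟨p, hp, hp1⟩ := hn
      symm
      rw [List.any_eq_true]
      refine ⟨p, hp, ?_⟩
      simp only [Bool.or_eq_true, decide_eq_true_eq]
      rw [← hp1] at hnst
      rw [PySem.Set.mem_ofList, List.mem_filter] at hnst
      push Not at hnst
      by_cases hend : PySem.Str.endswith p.1 "_index_hash" = true
      · exact Or.inl hend
      · have hnk : p.1 ∉ dFM.keys := by
          intro hk
          have := hnst hk
          simp only [ne_eq, Bool.not_eq_true', Bool.not_eq_false] at this
          exact hend this
        right
        rw [(PySem.Dict.get?_eq_none_iff_not_mem_keys _ _).mpr hnk]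
        simp

-- ===== VERDICT (by name: the statement is the Claim_ definition above) =====
theorem check_files_changed_py_spec : Claim_equal_check_files_changed_py := by
  intro fh fm _
  unfold Spec_check_files_changed_py
  exact check_files_changed_eq fh fm
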